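-- pv_equiv track=rewrite | github.com/xingyizhou/CenterTrack | src/tools/annot_bbox.py | _sort_expt
-- ===== SOURCE A (Python) =====
-- def _sort_expt(pts):
--   t, l, b, r = 0, 0, 0, 0
--   for i in range(4):
--     if pts[i][0] < pts[l][0]:
--       l = i
--     if pts[i][1] < pts[t][1]:
--       t = i
--     if pts[i][0] > pts[r][0]:
--       r = i
--     if pts[i][1] > pts[b][1]:
--       b = i
--   ret = [pts[t], pts[l], pts[b], pts[r]]
--   return ret
-- ===== SOURCE B (Python) =====
-- def _sort_expt(pts):
--   # sort-then-select: stable-sort the four indices along each axis and take the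
--   # head of each sorted order (ascending for top/left, descending for bottom/
--   # right); stability makes every head the FIRST extremal point, matching the
--   # original's strict-inequality tie-breaking
--   four = [pts[i] for i in range(4)]
--   def order(axis, rev):
--     return sorted(range(4), key=lambda i: four[i][axis], reverse=rev)
--   return [four[order(1, False)[0]], four[order(0, False)[0]],
--           four[order(1, True)[0]], four[order(0, True)[0]]]
-- ===== Notes on version B (the rewrite author's own statement) =====
-- stated objective: alternative
-- what changed: Replaces the fused four-variable comparison loop with a sort-then-select algorithm: the four indices are stably sorted along each axis (ascending and descending) and each extreme is read off as the head of a sorted order, stability reproducing the first-extremal tie-breaking.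
import Mathlib
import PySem

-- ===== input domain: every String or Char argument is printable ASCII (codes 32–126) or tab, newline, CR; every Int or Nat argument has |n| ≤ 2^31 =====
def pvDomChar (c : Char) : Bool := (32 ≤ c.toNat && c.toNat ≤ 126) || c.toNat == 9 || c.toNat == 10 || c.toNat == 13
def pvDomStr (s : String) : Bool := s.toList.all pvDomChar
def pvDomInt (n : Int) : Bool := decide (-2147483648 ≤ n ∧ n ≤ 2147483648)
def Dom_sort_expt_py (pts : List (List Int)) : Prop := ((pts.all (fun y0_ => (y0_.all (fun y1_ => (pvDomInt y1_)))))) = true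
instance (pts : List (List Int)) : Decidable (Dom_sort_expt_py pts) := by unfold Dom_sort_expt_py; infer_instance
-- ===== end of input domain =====

-- B replaces A's fused comparison loop by sort-then-select: it stably sorts the four
-- indices along each axis and reads each extreme off the head of a sorted order
-- (alternative algorithm; same result, including first-extremal tie-breaking).

-- pts[i][j] with defaults; exact under Pre_ (all accessed indices are in range there)
def pvAt (pts : List (List Int)) (i j : Int) : Int :=
  PySem.List.pyGetD (PySem.List.pyGetD pts i []) j 0

-- ===== PORT A =====
def sort_expt_py (pts : List (List Int)) : List (List Int) :=
  let st := (PySem.List.pyRange 0 4 1).foldl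
    (fun (s : Int × Int × Int × Int) i =>
      let t := s.1; let l := s.2.1; let b := s.2.2.1; let r := s.2.2.2
      let l := if pvAt pts i 0 < pvAt pts l 0 then i else l
      let t := if pvAt pts i 1 < pvAt pts t 1 then i else t
      let r := if pvAt pts i 0 > pvAt pts r 0 then i else r
      let b := if pvAt pts i 1 > pvAt pts b 1 then i else b
      (t, l, b, r)) (0, 0, 0, 0)
  [PySem.List.pyGetD pts st.1 [], PySem.List.pyGetD pts st.2.1 [],
   PySem.List.pyGetD pts st.2.2.1 [], PySem.List.pyGetD pts st.2.2.2 []]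

-- ===== PORT B =====
def sort_expt_py_alt (pts : List (List Int)) : List (List Int) :=
  let four := (PySem.List.pyRange 0 4 1).map (fun i => PySem.List.pyGetD pts i [])
  let order := fun (axis : Int) (rev : Bool) =>
    PySem.List.sorted (PySem.List.pyRange 0 4 1)
      (fun i => pvAt four i axis) rev
  [PySem.List.pyGetD four (PySem.List.pyGetD (order 1 false) 0 0) [],
   PySem.List.pyGetD four (PySem.List.pyGetD (order 0 false) 0 0) [],
   PySem.List.pyGetD four (PySem.List.pyGetD (order 1 true) 0 0) [],
   PySem.List.pyGetD four (PySem.List.pyGetD (order 0 true) 0 0) []]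

-- ===== PRECONDITION & SPEC =====
-- Pre_ excludes exactly the inputs where Python A raises IndexError:
-- fewer than 4 points, or one of the first four points shorter than 2.
def Pre_sort_expt_py (pts : List (List Int)) : Prop :=
  4 ≤ pts.length ∧ ∀ p ∈ pts.take 4, 2 ≤ p.length
instance (pts : List (List Int)) : Decidable (Pre_sort_expt_py pts) := by
  unfold Pre_sort_expt_py; infer_instance
def pvWitness_sort_expt_py : List (List Int) := [[0, 3], [2, 1], [5, 4], [-1, 2]]
def Spec_sort_expt_py (pts : List (List Int)) (out : List (List Int)) : Prop :=
  out = sort_expt_py_alt pts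
instance (pts : List (List Int)) (out : List (List Int)) : Decidable (Spec_sort_expt_py pts out) := by
  unfold Spec_sort_expt_py; infer_instance

-- ===== CLAIM (what is proved, stated in full; the proofs are below) =====
def Claim_equal_sort_expt_py : Prop := ∀ (pts : List (List Int)), Dom_sort_expt_py pts → Pre_sort_expt_py pts → Spec_sort_expt_py pts (sort_expt_py pts)

-- ===== LEMMAS AND PROOFS =====

-- one unfolding step of B's insertion sort (rfl facts about PySem.List.insertBy)
theorem pv_insertBy_nil {α : Type} (f : α → α → Bool) (x : α) :
    PySem.List.insertBy f x [] = [x] := rfl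
theorem pv_insertBy_cons {α : Type} (f : α → α → Bool) (x y : α) (ys : List α) :
    PySem.List.insertBy f x (y :: ys) =
      if f x y then x :: y :: ys else y :: PySem.List.insertBy f x ys := rfl

-- head of the stable ascending sort of [0,1,2,3] by key k = A's first-minimum chain
set_option maxHeartbeats 1000000 in
theorem pv_head_sorted4 (k : Int → Int) :
    PySem.List.pyGetD (PySem.List.sorted [(0:Int), 1, 2, 3] k false) 0 0
    = (if k 3 < (if k 2 < (if k 1 < k 0 then k 1 else k 0) then k 2
                 else if k 1 < k 0 then k 1 else k 0) then 3
       else if k 2 < (if k 1 < k 0 then k 1 else k 0) then 2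
       else if k 1 < k 0 then 1 else 0) := by
  simp only [PySem.List.sorted, List.foldl, pv_insertBy_nil, pv_insertBy_cons,
    decide_eq_true_eq, Bool.false_eq_true, reduceIte]
  repeat' (split_ifs <;> simp only [pv_insertBy_cons, pv_insertBy_nil,
    decide_eq_true_eq, Bool.false_eq_true, reduceIte, PySem.List.pyGetD_zero_cons])
  all_goals
    first
    | contradiction
    | (split_ifs <;> (first | contradiction | omega))
    | omega
    | rfl
    | simp_all

-- head of the stable descending sort of [0,1,2,3] by key k = A's first-maximum chain
set_option maxHeartbeats 1000000 in
theorem pv_head_sorted4_rev (k : Int → Int) :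
    PySem.List.pyGetD (PySem.List.sorted [(0:Int), 1, 2, 3] k true) 0 0
    = (if (if (if k 0 < k 1 then k 1 else k 0) < k 2 then k 2
           else if k 0 < k 1 then k 1 else k 0) < k 3 then 3
       else if (if k 0 < k 1 then k 1 else k 0) < k 2 then 2
       else if k 0 < k 1 then 1 else 0) := by
  simp only [PySem.List.sorted, List.foldl, pv_insertBy_nil, pv_insertBy_cons,
    decide_eq_true_eq, Bool.false_eq_true, reduceIte]
  repeat' (split_ifs <;> simp only [pv_insertBy_cons, pv_insertBy_nil,
    decide_eq_true_eq, Bool.false_eq_true, reduceIte, PySem.List.pyGetD_zero_cons])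
  all_goals
    first
    | contradiction
    | (split_ifs <;> (first | contradiction | omega))
    | omega
    | rfl
    | simp_all

-- ===== VERDICT (by name: the statement is the Claim_ definition above) =====
set_option maxHeartbeats 2000000 in
theorem sort_expt_py_spec : Claim_equal_sort_expt_py := by
  intro pts _ hpre
  obtain ⟨hlen, hwide⟩ := hpre
  rcases pts with _ | ⟨p0, _ | ⟨p1, _ | ⟨p2, _ | ⟨p3, rest⟩⟩⟩⟩ <;>
    simp [List.length_cons] at hlen <;> try omega
  have h0 := hwide p0 (by simp [List.take])
  have h1 := hwide p1 (by simp [List.take])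
  have h2 := hwide p2 (by simp [List.take])
  have h3 := hwide p3 (by simp [List.take])
  rcases p0 with _ | ⟨x0, _ | ⟨y0, t0⟩⟩ <;> (simp [List.length_cons] at h0 <;> try omega)
  rcases p1 with _ | ⟨x1, _ | ⟨y1, t1⟩⟩ <;> (simp [List.length_cons] at h1 <;> try omega)
  rcases p2 with _ | ⟨x2, _ | ⟨y2, t2⟩⟩ <;> (simp [List.length_cons] at h2 <;> try omega)
  rcases p3 with _ | ⟨x3, _ | ⟨y3, t3⟩⟩ <;> (simp [List.length_cons] at h3 <;> try omega)
  have r0 : PySem.List.pyGetD ((x0 :: y0 :: t0) :: (x1 :: y1 :: t1) :: (x2 :: y2 :: t2) :: (x3 :: y3 :: t3) :: rest) 0 [] = x0 :: y0 :: t0 := by simp [pysem]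
  have r1 : PySem.List.pyGetD ((x0 :: y0 :: t0) :: (x1 :: y1 :: t1) :: (x2 :: y2 :: t2) :: (x3 :: y3 :: t3) :: rest) 1 [] = x1 :: y1 :: t1 := by simp [pysem]
  have r2 : PySem.List.pyGetD ((x0 :: y0 :: t0) :: (x1 :: y1 :: t1) :: (x2 :: y2 :: t2) :: (x3 :: y3 :: t3) :: rest) 2 [] = x2 :: y2 :: t2 := by simp [pysem]
  have r3 : PySem.List.pyGetD ((x0 :: y0 :: t0) :: (x1 :: y1 :: t1) :: (x2 :: y2 :: t2) :: (x3 :: y3 :: t3) :: rest) 3 [] = x3 :: y3 :: t3 := by simp [pysem]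
  have a00 : pvAt ((x0 :: y0 :: t0) :: (x1 :: y1 :: t1) :: (x2 :: y2 :: t2) :: (x3 :: y3 :: t3) :: rest) 0 0 = x0 := by simp [pvAt, pysem]
  have b00 : pvAt ([x0 :: y0 :: t0, x1 :: y1 :: t1, x2 :: y2 :: t2, x3 :: y3 :: t3]) 0 0 = x0 := by simp [pvAt, pysem]
  have a01 : pvAt ((x0 :: y0 :: t0) :: (x1 :: y1 :: t1) :: (x2 :: y2 :: t2) :: (x3 :: y3 :: t3) :: rest) 0 1 = y0 := by simp [pvAt, pysem]
  have b01 : pvAt ([x0 :: y0 :: t0, x1 :: y1 :: t1, x2 :: y2 :: t2, x3 :: y3 :: t3]) 0 1 = y0 := by simp [pvAt, pysem]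
  have a10 : pvAt ((x0 :: y0 :: t0) :: (x1 :: y1 :: t1) :: (x2 :: y2 :: t2) :: (x3 :: y3 :: t3) :: rest) 1 0 = x1 := by simp [pvAt, pysem]
  have b10 : pvAt ([x0 :: y0 :: t0, x1 :: y1 :: t1, x2 :: y2 :: t2, x3 :: y3 :: t3]) 1 0 = x1 := by simp [pvAt, pysem]
  have a11 : pvAt ((x0 :: y0 :: t0) :: (x1 :: y1 :: t1) :: (x2 :: y2 :: t2) :: (x3 :: y3 :: t3) :: rest) 1 1 = y1 := by simp [pvAt, pysem]
  have b11 : pvAt ([x0 :: y0 :: t0, x1 :: y1 :: t1, x2 :: y2 :: t2, x3 :: y3 :: t3]) 1 1 = y1 := by simp [pvAt, pysem]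
  have a20 : pvAt ((x0 :: y0 :: t0) :: (x1 :: y1 :: t1) :: (x2 :: y2 :: t2) :: (x3 :: y3 :: t3) :: rest) 2 0 = x2 := by simp [pvAt, pysem]
  have b20 : pvAt ([x0 :: y0 :: t0, x1 :: y1 :: t1, x2 :: y2 :: t2, x3 :: y3 :: t3]) 2 0 = x2 := by simp [pvAt, pysem]
  have a21 : pvAt ((x0 :: y0 :: t0) :: (x1 :: y1 :: t1) :: (x2 :: y2 :: t2) :: (x3 :: y3 :: t3) :: rest) 2 1 = y2 := by simp [pvAt, pysem]
  have b21 : pvAt ([x0 :: y0 :: t0, x1 :: y1 :: t1, x2 :: y2 :: t2, x3 :: y3 :: t3]) 2 1 = y2 := by simp [pvAt, pysem]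
  have a30 : pvAt ((x0 :: y0 :: t0) :: (x1 :: y1 :: t1) :: (x2 :: y2 :: t2) :: (x3 :: y3 :: t3) :: rest) 3 0 = x3 := by simp [pvAt, pysem]
  have b30 : pvAt ([x0 :: y0 :: t0, x1 :: y1 :: t1, x2 :: y2 :: t2, x3 :: y3 :: t3]) 3 0 = x3 := by simp [pvAt, pysem]
  have a31 : pvAt ((x0 :: y0 :: t0) :: (x1 :: y1 :: t1) :: (x2 :: y2 :: t2) :: (x3 :: y3 :: t3) :: rest) 3 1 = y3 := by simp [pvAt, pysem]
  have b31 : pvAt ([x0 :: y0 :: t0, x1 :: y1 :: t1, x2 :: y2 :: t2, x3 :: y3 :: t3]) 3 1 = y3 := by simp [pvAt, pysem]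
  unfold Spec_sort_expt_py sort_expt_py sort_expt_py_alt
  simp only [show PySem.List.pyRange 0 4 1 = [0, 1, 2, 3] from by decide,
    List.foldl, List.map, r0, r1, r2, r3, pv_head_sorted4, pv_head_sorted4_rev,
    a00, a01, a10, a11, a20, a21, a30, a31, b00, b01, b10, b11, b20, b21, b30, b31]
  simp only [List.cons.injEq, and_true]
  refine ⟨?_, ?_, ?_, ?_⟩ <;>
    · repeat' (split_ifs <;>
        simp only [a00, a01, a10, a11, a20, a21, a30, a31, r0, r1, r2, r3])
      all_goals first | rfl | omega
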